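-- pv_equiv track=rewrite | github.com/pypi-data/pypi-mirror-330 | packages/bio-IGLoo/bio-IGLoo-0.1.0.tar.gz/bio-IGLoo-0.1.0/IGLoo/scripts/ig_SV_typing.py | check_consistent
-- ===== SOURCE A (Python) =====
-- def check_consistent(list_haplotype):
--     num_contigs = len(list_haplotype)
--     list_consensus = []
--     flag_consist = True
--     for idx, sv in enumerate(list_haplotype[0]):
--         hap = -1
--         list_consensus.append(hap)
--         for idy in range(num_contigs):
--             current_hap = list_haplotype[idy][idx]
--             if current_hap == -1:
--                 continue
--             elif hap == -1:
--                 hap = current_hap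
--             else:
--                 if current_hap == hap:
--                     continue
--                 else:
--                     flag_consist = False
--                     hap = -1
--                     break
--         list_consensus[-1] = hap
--     return flag_consist, list_consensus
-- ===== SOURCE B (Python) =====
-- def check_consistent(list_haplotype):
--     num_contigs = len(list_haplotype)
--     list_consensus = []
--     flag_consist = True
--     for idx in range(len(list_haplotype[0])):
--         distinct = {list_haplotype[idy][idx] for idy in range(num_contigs)
--                     if list_haplotype[idy][idx] != -1}
--         if len(distinct) == 0:
--             list_consensus.append(-1)
--         elif len(distinct) == 1:
--             list_consensus.append(distinct.pop())
--         else: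
--             flag_consist = False
--             list_consensus.append(-1)
--     return flag_consist, list_consensus
-- ===== Notes on version B (the rewrite author's own statement) =====
-- stated objective: simpler
-- what changed: Replaces A's stateful first-value scan with early break by a per-column build-the-distinct-set-then-decide-on-its-cardinality pass; Pre_ excludes ragged inputs (a row shorter than row 0), where A either raises IndexError or returns only by accident of its early inner-loop break and B raises.
-- outside the precondition, e.g. on check_consistent([[1, 2], [2, 0], [3]]): A returns (False, [-1, -1]), B raises IndexError
import Mathlib
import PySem

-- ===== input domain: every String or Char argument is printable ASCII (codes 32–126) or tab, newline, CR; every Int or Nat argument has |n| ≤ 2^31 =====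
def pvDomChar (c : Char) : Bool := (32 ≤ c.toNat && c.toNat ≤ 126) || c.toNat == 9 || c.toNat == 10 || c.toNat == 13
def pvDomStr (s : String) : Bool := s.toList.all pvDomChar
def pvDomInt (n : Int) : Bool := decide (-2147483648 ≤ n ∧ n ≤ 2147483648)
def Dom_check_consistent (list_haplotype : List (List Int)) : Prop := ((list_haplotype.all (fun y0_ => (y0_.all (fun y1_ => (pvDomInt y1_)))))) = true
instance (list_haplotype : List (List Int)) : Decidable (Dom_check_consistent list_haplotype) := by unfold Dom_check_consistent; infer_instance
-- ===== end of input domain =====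

-- B replaces A's stateful first-value scan with early break by a per-column
-- distinct-set-then-cardinality pass (objective: simpler).

-- ===== PORT A =====
-- Inner 'for idy in range(num_contigs)' loop of A: carries (hap, flag), breaks on conflict.
-- Indexing list_haplotype[idy][idx] is ported totally via getD; Pre_ guarantees both
-- indices are in range, so getD equals Python's indexing on every admitted input.
def pvAInner (rows : List (List Int)) (idx : Nat) : List Nat → Int → Bool → Bool × Int
  | [], hap, flag => (flag, hap)
  | idy :: rest, hap, flag =>
    if (rows.getD idy []).getD idx (-1) = -1 then pvAInner rows idx rest hap flag
    else if hap = -1 then pvAInner rows idx rest ((rows.getD idy []).getD idx (-1)) flag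
    else if (rows.getD idy []).getD idx (-1) = hap then pvAInner rows idx rest hap flag
    else (false, -1)

-- Outer 'for idx, sv in enumerate(list_haplotype[0])' loop (sv unused; idx is the running
-- enumerate counter; append-then-overwrite of list_consensus[-1] is ported as appending the final hap).
def pvAOuter (rows : List (List Int)) : List Int → Nat → Bool → List Int → Bool × List Int
  | [], _, flag, cons => (flag, cons)
  | _ :: rest, idx, flag, cons =>
    pvAOuter rows rest (idx + 1) (pvAInner rows idx (List.range rows.length) (-1) flag).1
      (cons ++ [(pvAInner rows idx (List.range rows.length) (-1) flag).2])

def check_consistent (list_haplotype : List (List Int)) : Bool × List Int :=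
  pvAOuter list_haplotype (list_haplotype.headD []) 0 true []

-- ===== PORT B =====
-- distinct = {list_haplotype[idy][idx] for idy in range(num_contigs) if list_haplotype[idy][idx] != -1}
def pvBDistinct (rows : List (List Int)) (num_contigs : Nat) (idx : Nat) : PySem.Set Int :=
  PySem.Set.ofList ((List.range num_contigs).filterMap (fun idy =>
    if (rows.getD idy []).getD idx (-1) = -1 then none
    else some ((rows.getD idy []).getD idx (-1))))

-- 'for idx in range(len(list_haplotype[0]))' loop of B, deciding on the set's cardinality
-- (len == 0 / len == 1 with distinct.pop() / otherwise).
def pvBOuter (rows : List (List Int)) (num_contigs : Nat) : List Nat → Bool → List Int → Bool × List Int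
  | [], flag, cons => (flag, cons)
  | idx :: rest, flag, cons =>
    match pvBDistinct rows num_contigs idx with
    | [] => pvBOuter rows num_contigs rest flag (cons ++ [-1])
    | [v] => pvBOuter rows num_contigs rest flag (cons ++ [v])
    | _ => pvBOuter rows num_contigs rest false (cons ++ [-1])

def check_consistent_alt (list_haplotype : List (List Int)) : Bool × List Int :=
  pvBOuter list_haplotype list_haplotype.length
    (List.range (list_haplotype.headD []).length) true []

-- ===== PRECONDITION & SPEC =====
-- Pre_ excludes inputs where list_haplotype is empty (A raises IndexError on list_haplotype[0])
-- and ragged inputs with a row shorter than row 0: there A usually raises IndexError, returning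
-- only by accident of its early inner-loop break, and B (which always scans all rows) raises.
def Pre_check_consistent (list_haplotype : List (List Int)) : Prop :=
  list_haplotype ≠ [] ∧
  ∀ row ∈ list_haplotype, (list_haplotype.headD []).length ≤ row.length
instance (list_haplotype : List (List Int)) : Decidable (Pre_check_consistent list_haplotype) := by unfold Pre_check_consistent; infer_instance

def pvWitness_check_consistent : List (List Int) := [[1, -1, 3], [1, 2, 3]]

def Spec_check_consistent (list_haplotype : List (List Int)) (out : Bool × List Int) : Prop := out = check_consistent_alt list_haplotype
instance (list_haplotype : List (List Int)) (out : Bool × List Int) : Decidable (Spec_check_consistent list_haplotype out) := by unfold Spec_check_consistent; infer_instance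

-- ===== CLAIM (what is proved, stated in full; the proofs are below) =====
def Claim_equal_check_consistent : Prop := ∀ (list_haplotype : List (List Int)), Dom_check_consistent list_haplotype → Pre_check_consistent list_haplotype → Spec_check_consistent list_haplotype (check_consistent list_haplotype)

-- ===== LEMMAS AND PROOFS =====

-- The non-(-1) column values A and B both read, in contig order.
def pvVals (rows : List (List Int)) (idx : Nat) (L : List Nat) : List Int :=
  L.filterMap (fun idy =>
    if (rows.getD idy []).getD idx (-1) = -1 then none
    else some ((rows.getD idy []).getD idx (-1)))

lemma pvVals_cons (rows : List (List Int)) (idx : Nat) (idy : Nat) (rest : List Nat) :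
    pvVals rows idx (idy :: rest) =
      if (rows.getD idy []).getD idx (-1) = -1 then pvVals rows idx rest
      else (rows.getD idy []).getD idx (-1) :: pvVals rows idx rest := by
  by_cases h : (rows.getD idy []).getD idx (-1) = -1 <;>
    · simp only [List.getD_eq_getElem?_getD] at h
      simp [pvVals, h]

lemma pvSet_add_prefix {α : Type} [BEq α] (s : PySem.Set α) (x : α) : s <+: PySem.Set.add s x := by
  unfold PySem.Set.add
  split
  · exact List.prefix_refl s
  · exact ⟨[x], rfl⟩

lemma pvSet_foldl_add_prefix {α : Type} [BEq α] (t : List α) (s : PySem.Set α) :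
    s <+: t.foldl PySem.Set.add s := by
  induction t generalizing s with
  | nil => exact List.prefix_refl s
  | cons x xs ih => exact (pvSet_add_prefix s x).trans (ih _)

lemma pvSet_foldl_add_singleton (c : Int) (t : List Int) :
    t.foldl PySem.Set.add [c] = [c] ↔ ∀ u ∈ t, u = c := by
  induction t with
  | nil => simp
  | cons x xs ih =>
    simp only [List.foldl_cons, List.mem_cons]
    by_cases hx : x = c
    · subst hx
      have hadd : PySem.Set.add [x] x = [x] := by
        simp [PySem.Set.add, PySem.Set.contains]
      rw [hadd]
      constructor
      · intro h u hu
        rcases hu with h1 | h2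
        · exact h1
        · exact (ih.mp h) u h2
      · intro h; exact ih.mpr (fun u hu => h u (Or.inr hu))
    · have hadd : PySem.Set.add [c] x = [c, x] := by
        simp [PySem.Set.add, PySem.Set.contains, hx]
      rw [hadd]
      constructor
      · intro h
        rcases pvSet_foldl_add_prefix xs [c, x] with ⟨r, hr⟩
        rw [← hr] at h
        simp at h
      · intro h; exact absurd (h x (Or.inl rfl)) hx

lemma pvSet_ofList_cons_eq (c : Int) (t : List Int) :
    PySem.Set.ofList (c :: t) = t.foldl PySem.Set.add [c] := by
  have h : PySem.Set.ofList (c :: t) = (c :: t).foldl PySem.Set.add [] :=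
    PySem.Set.ofList_eq_foldl _
  rw [h, List.foldl_cons]
  congr 1

-- A's inner loop once a first value c ≠ -1 has been adopted.
lemma pvAInner_committed (rows : List (List Int)) (idx : Nat) (L : List Nat)
    (c : Int) (hc : c ≠ -1) (flag : Bool) :
    pvAInner rows idx L c flag =
      if ∀ u ∈ pvVals rows idx L, u = c then (flag, c) else (false, -1) := by
  induction L with
  | nil => simp [pvAInner, pvVals]
  | cons idy rest ih =>
    rw [pvVals_cons]
    by_cases h1 : (rows.getD idy []).getD idx (-1) = -1
    · rw [if_pos h1]
      simp only [pvAInner, if_pos h1]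
      exact ih
    · rw [if_neg h1]
      simp only [pvAInner, if_neg h1, if_neg hc]
      by_cases h2 : (rows.getD idy []).getD idx (-1) = c
      · rw [if_pos h2, ih, h2]
        by_cases hall : ∀ u ∈ pvVals rows idx rest, u = c
        · rw [if_pos hall, if_pos]
          intro u hu
          rcases List.mem_cons.mp hu with h | h
          · exact h
          · exact hall u h
        · rw [if_neg hall, if_neg]
          intro hcon
          exact hall (fun u hu => hcon u (List.mem_cons_of_mem _ hu))
      · rw [if_neg h2, if_neg]
        intro hcon
        exact h2 (hcon _ List.mem_cons_self)

-- A's inner loop from the initial hap = -1 equals B's cardinality decision on the distinct set.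
lemma pvAInner_eq_set (rows : List (List Int)) (idx : Nat) (L : List Nat) (flag : Bool) :
    pvAInner rows idx L (-1) flag =
      match PySem.Set.ofList (pvVals rows idx L) with
      | [] => (flag, -1)
      | [v] => (flag, v)
      | _ => (false, -1) := by
  induction L with
  | nil => simp [pvAInner, pvVals, PySem.Set.ofList]
  | cons idy rest ih =>
    rw [pvVals_cons]
    by_cases h1 : (rows.getD idy []).getD idx (-1) = -1
    · rw [if_pos h1]
      simp only [pvAInner, if_pos h1]
      exact ih
    · rw [if_neg h1]
      simp only [pvAInner, if_neg h1, reduceIte]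
      rw [pvAInner_committed rows idx rest _ h1 flag, pvSet_ofList_cons_eq]
      by_cases hall : ∀ u ∈ pvVals rows idx rest, u = (rows.getD idy []).getD idx (-1)
      · rw [if_pos hall, (pvSet_foldl_add_singleton _ _).mpr hall]
      · rw [if_neg hall]
        have hne : (pvVals rows idx rest).foldl PySem.Set.add [(rows.getD idy []).getD idx (-1)] ≠
            [(rows.getD idy []).getD idx (-1)] := by
          intro h; exact hall ((pvSet_foldl_add_singleton _ _).mp h)
        rcases pvSet_foldl_add_prefix (pvVals rows idx rest)
            [(rows.getD idy []).getD idx (-1)] with ⟨r, hr⟩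
        rcases r with _ | ⟨a, r'⟩
        · simp at hr; exact absurd hr.symm hne
        · rw [← hr]; rfl

lemma pvBDistinct_eq (rows : List (List Int)) (n : Nat) (idx : Nat) :
    pvBDistinct rows n idx = PySem.Set.ofList (pvVals rows idx (List.range n)) := rfl

-- Outer loops agree column by column.
lemma pvOuter_eq (rows : List (List Int)) (svs : List Int) (idx0 : Nat) (flag : Bool)
    (cons : List Int) :
    pvAOuter rows svs idx0 flag cons =
      pvBOuter rows rows.length (List.range' idx0 svs.length) flag cons := by
  induction svs generalizing idx0 flag cons with
  | nil => rfl
  | cons sv rest ih =>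
    simp only [pvAOuter, List.length_cons, List.range'_succ, pvBOuter]
    rw [pvAInner_eq_set rows idx0 (List.range rows.length) flag, pvBDistinct_eq]
    rcases h : PySem.Set.ofList (pvVals rows idx0 (List.range rows.length)) with _ | ⟨v, _ | t⟩ <;>
      simp [ih]

-- ===== VERDICT (by name: the statement is the Claim_ definition above) =====
theorem check_consistent_spec : Claim_equal_check_consistent := by
  intro rows _ _
  show check_consistent rows = check_consistent_alt rows
  unfold check_consistent check_consistent_alt
  rw [pvOuter_eq, List.range_eq_range']
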